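-- pv_equiv track=rewrite | github.com/dGakamsky/CalKit | datamaths.py | get_intersections
-- ===== SOURCE A (Python) =====
-- def get_intersections(scan1, scan2):
--     del scan2[1][-1]
--     del scan2[0][-1]
--     scan1_x = scan1[0]
--     scan2_x = scan2[0]
--     intersection = set(scan1_x).intersection(scan2_x)
--     intersection = sorted(intersection)
--     indices_a_x = [scan1[0].index(x) for x in intersection]
--     indices_b_x = [scan2[0].index(x) for x in intersection]
--     indexed_a_x = []
--     indexed_b_x = []
--     indexed_a_y = []
--     indexed_b_y = []
--     for i in indices_a_x:
--         indexed_a_y.append(scan1[1][i])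
--     for i in indices_b_x:
--         indexed_b_y.append(scan2[1][i])
--     for i in indices_a_x:
--         indexed_a_x.append(scan1[0][i])
--     for i in indices_b_x:
--         indexed_b_x.append(scan2[0][i])
--     return indexed_a_x, indexed_b_x, indexed_a_y, indexed_b_y
-- ===== SOURCE B (Python) =====
-- def _first_of_runs(pairs):
--     # pairs is sorted by x; keep the first pair of each equal-x run
--     out = []
--     i, n = 0, len(pairs)
--     while i < n:
--         x, y = pairs[i]
--         out.append((x, y))
--         while i < n and pairs[i][0] == x:
--             i += 1
--     return out
--
--
-- def _merge_common(u, v):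
--     # u, v strictly increasing by x; classic two-pointer merge over common x
--     ax, bx, ay, by = [], [], [], []
--     i = j = 0
--     while i < len(u) and j < len(v):
--         if u[i][0] < v[j][0]:
--             i += 1
--         elif v[j][0] < u[i][0]:
--             j += 1
--         else:
--             ax.append(u[i][0])
--             bx.append(v[j][0])
--             ay.append(u[i][1])
--             by.append(v[j][1])
--             i += 1
--             j += 1
--     return ax, bx, ay, by
--
--
-- def get_intersections(scan1, scan2):
--     # Same in-place trim of scan2 as the original (observable mutation kept).
--     del scan2[1][-1]
--     del scan2[0][-1]
--     u = _first_of_runs(sorted(zip(scan1[0], scan1[1]), key=lambda p: p[0]))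
--     v = _first_of_runs(sorted(zip(scan2[0], scan2[1]), key=lambda p: p[0]))
--     return _merge_common(u, v)
-- ===== Notes on version B (the rewrite author's own statement) =====
-- stated objective: alternative
-- what changed: Replaces A's set-intersection plus per-element list.index scans with a sort-then-merge algorithm: each scan's (x,y) pairs are stably sorted by x, collapsed to the first pair of each equal-x run, and the two strictly increasing lists are merged with a classic two-pointer sweep that emits the common x's and their y's in one pass.
-- outside the precondition, e.g. on get_intersections([[5]], [[1, 2], [1, 2]]): A returns ([], [], [], []), B raises IndexError
import Mathlib
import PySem

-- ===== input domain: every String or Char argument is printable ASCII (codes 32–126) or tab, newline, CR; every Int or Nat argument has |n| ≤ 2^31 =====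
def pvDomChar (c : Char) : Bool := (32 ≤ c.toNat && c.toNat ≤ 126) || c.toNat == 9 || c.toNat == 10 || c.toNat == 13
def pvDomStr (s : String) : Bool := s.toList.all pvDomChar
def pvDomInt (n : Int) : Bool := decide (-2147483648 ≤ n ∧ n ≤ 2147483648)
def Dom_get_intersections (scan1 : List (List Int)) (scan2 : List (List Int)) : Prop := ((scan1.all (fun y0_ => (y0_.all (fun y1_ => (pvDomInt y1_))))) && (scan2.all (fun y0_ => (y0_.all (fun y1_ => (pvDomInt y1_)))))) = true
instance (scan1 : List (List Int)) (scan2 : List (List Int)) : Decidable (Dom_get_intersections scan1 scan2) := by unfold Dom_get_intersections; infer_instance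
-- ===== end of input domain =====

-- B replaces A's set-intersection + per-element list.index scans with sort-then-merge:
-- stably sort each scan's (x,y) pairs by x, keep the first pair of each equal-x run, and
-- two-pointer-merge the two strictly increasing lists (objective: alternative algorithm). Both programs
-- mutate scan2 in place identically (last element of scan2[0] and scan2[1] deleted); the
-- equivalence proved here is about the return value.


-- ===== PORT A =====
-- Literal port of A. Under Pre_ every container access is in range, so 'del xs[-1]' is
-- List.dropLast, scan[i] is List.getD i [], and the .index/xs[i] accesses use getD forms.
def get_intersections (scan1 : List (List Int)) (scan2 : List (List Int)) : List Int × List Int × List Int × List Int :=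
  let scan2_1 := (scan2.getD 1 []).dropLast        -- del scan2[1][-1]
  let scan2_0 := (scan2.getD 0 []).dropLast        -- del scan2[0][-1]
  let scan1_x := scan1.getD 0 []
  let scan2_x := scan2_0
  let inter := PySem.Set.inter (PySem.Set.ofList scan1_x) scan2_x
  let intersection := PySem.List.sorted inter (fun x => x) false
  let indices_a_x := intersection.map (fun x => (PySem.List.index? scan1_x x).getD 0)
  let indices_b_x := intersection.map (fun x => (PySem.List.index? scan2_0 x).getD 0)
  let indexed_a_y := indices_a_x.map (fun i => (scan1.getD 1 []).getD i 0)
  let indexed_b_y := indices_b_x.map (fun i => scan2_1.getD i 0)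
  let indexed_a_x := indices_a_x.map (fun i => scan1_x.getD i 0)
  let indexed_b_x := indices_b_x.map (fun i => scan2_0.getD i 0)
  (indexed_a_x, indexed_b_x, indexed_a_y, indexed_b_y)

-- ===== PORT B =====
-- Literal port of Source B.  _first_of_runs's outer while advances i past the whole equal-x
-- run (the inner while), i.e. recurses on 'dropWhile (·.1 == x)' of the remainder.
def firstOfRuns (pairs : List (Int × Int)) : List (Int × Int) :=
  match pairs with
  | [] => []
  | p :: rest => p :: firstOfRuns (rest.dropWhile (fun q => q.1 == p.1))
termination_by pairs.length
decreasing_by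
  simp only [List.length_cons]
  exact Nat.lt_succ_of_le (List.length_dropWhile_le _ _)

-- _merge_common's two-pointer while loop: each branch advances i, j, or both; the four
-- appended rows become the four cons'd components.
def mergeCommon : List (Int × Int) → List (Int × Int) → List Int × List Int × List Int × List Int
  | [], _ => ([], [], [], [])
  | _ :: _, [] => ([], [], [], [])
  | (x1, y1) :: u, (x2, y2) :: v =>
    if x1 < x2 then mergeCommon u ((x2, y2) :: v)
    else if x2 < x1 then mergeCommon ((x1, y1) :: u) v
    else
      let r := mergeCommon u v
      (x1 :: r.1, x2 :: r.2.1, y1 :: r.2.2.1, y2 :: r.2.2.2)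
termination_by u v => u.length + v.length

def get_intersections_alt (scan1 : List (List Int)) (scan2 : List (List Int)) : List Int × List Int × List Int × List Int :=
  let s2y := (scan2.getD 1 []).dropLast            -- del scan2[1][-1]
  let s2x := (scan2.getD 0 []).dropLast            -- del scan2[0][-1]
  let u := firstOfRuns (PySem.List.sorted ((scan1.getD 0 []).zip (scan1.getD 1 [])) (fun p => p.1) false)
  let v := firstOfRuns (PySem.List.sorted (s2x.zip s2y) (fun p => p.1) false)
  mergeCommon u v

-- ===== PRECONDITION & SPEC =====
-- Pre_ excludes exactly: inputs where A raises (a scan2 row missing or empty, or a common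
-- x-value whose first index is outside the matching y-row), and inputs where scan1 has
-- fewer than two rows — there A returns ([],[],[],[]) when the scans share no x-value
-- (it only reads scan1[1] inside a loop) while B reads scan1[1] unconditionally and raises.
def Pre_get_intersections (scan1 : List (List Int)) (scan2 : List (List Int)) : Prop :=
  2 ≤ scan1.length ∧ 2 ≤ scan2.length ∧
  scan2.getD 0 [] ≠ [] ∧ scan2.getD 1 [] ≠ [] ∧
  ∀ x ∈ scan1.getD 0 [], x ∈ (scan2.getD 0 []).dropLast →
    (PySem.List.index? (scan1.getD 0 []) x).getD 0 < (scan1.getD 1 []).length ∧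
    (PySem.List.index? ((scan2.getD 0 []).dropLast) x).getD 0 < ((scan2.getD 1 []).dropLast).length
instance (scan1 : List (List Int)) (scan2 : List (List Int)) : Decidable (Pre_get_intersections scan1 scan2) := by unfold Pre_get_intersections; infer_instance
def pvWitness_get_intersections : List (List Int) × List (List Int) := ([[1, 2], [10, 20]], [[1, 3, 9], [5, 6, 7]])

def Spec_get_intersections (scan1 : List (List Int)) (scan2 : List (List Int)) (out : List Int × List Int × List Int × List Int) : Prop := out = get_intersections_alt scan1 scan2
instance (scan1 : List (List Int)) (scan2 : List (List Int)) (out : List Int × List Int × List Int × List Int) : Decidable (Spec_get_intersections scan1 scan2 out) := by unfold Spec_get_intersections; infer_instance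

-- ===== CLAIM (what is proved, stated in full; the proofs are below) =====
def Claim_equal_get_intersections : Prop := ∀ (scan1 : List (List Int)) (scan2 : List (List Int)), Dom_get_intersections scan1 scan2 → Pre_get_intersections scan1 scan2 → Spec_get_intersections scan1 scan2 (get_intersections scan1 scan2)

-- ===== LEMMAS AND PROOFS =====

-- first-match lookup for k is unaffected by dropping a prefix of pairs keyed a ≠ k
theorem lookup_eq_none_of_forall (l : List (Int × Int)) (k : Int)
    (h : ∀ q ∈ l, k ≠ q.1) : List.lookup k l = none := by
  induction l with
  | nil => rfl
  | cons q l ih =>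
    simp only [List.lookup, beq_false_of_ne (h q List.mem_cons_self)]
    exact ih (fun r hr => h r (List.mem_cons_of_mem _ hr))

theorem lookup_dropWhile_eq (l : List (Int × Int)) (a k : Int) (hk : k ≠ a) :
    List.lookup k (l.dropWhile (fun q => q.1 == a)) = List.lookup k l := by
  induction l with
  | nil => rfl
  | cons q l ih =>
    by_cases hq : q.1 = a
    · rw [List.dropWhile_cons_of_pos (by simpa using hq), ih]
      have : k ≠ q.1 := by omega
      simp [List.lookup, beq_false_of_ne this]
    · rw [List.dropWhile_cons_of_neg (by simpa using hq)]

-- every element of dropWhile (key == a) of an a-lower-bounded key-sorted list has key > a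
theorem dropWhile_key_gt (l : List (Int × Int)) (a : Int)
    (hs : l.Pairwise (fun p q => p.1 ≤ q.1)) (hb : ∀ q ∈ l, a ≤ q.1) :
    ∀ q ∈ l.dropWhile (fun q => q.1 == a), a < q.1 := by
  induction l with
  | nil => simp
  | cons r l ih =>
    obtain ⟨hr, hl⟩ := List.pairwise_cons.mp hs
    by_cases hra : r.1 = a
    · rw [List.dropWhile_cons_of_pos (by simpa using hra)]
      exact ih hl (fun q hq => hb q (List.mem_cons_of_mem _ hq))
    · rw [List.dropWhile_cons_of_neg (by simpa using hra)]
      intro q hq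
      rcases List.mem_cons.mp hq with rfl | hq
      · have := hb q List.mem_cons_self; omega
      · have h1 := hb r List.mem_cons_self
        have h2 := hr q hq
        omega

-- The y-list selected at x's first index is the first-match lookup in zip(xs, ys).
theorem lookup_zip_index (xs ys : List Int) (x : Int) (i : Nat)
    (hidx : PySem.List.index? xs x = some i) (hlt : i < ys.length) :
    List.lookup x (xs.zip ys) = ys[i]? := by
  induction xs generalizing ys i with
  | nil => simp [PySem.List.index?, List.idxOf?] at hidx
  | cons a xs ih =>
    cases ys with
    | nil => simp at hlt
    | cons c ys =>
      by_cases hx : a = x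
      · subst hx
        rw [PySem.List.index?_cons_self] at hidx
        injection hidx with h
        subst h
        simp
      · rw [PySem.List.index?_cons_of_ne xs hx] at hidx
        rcases h : PySem.List.index? xs x with _ | j
        · rw [h] at hidx; simp at hidx
        · rw [h] at hidx
          simp only [Option.map_some] at hidx
          injection hidx with h'
          subst h'
          simp only [List.zip_cons_cons, List.lookup, beq_false_of_ne (Ne.symm hx),
            List.getElem?_cons_succ]
          exact ih ys j h (by simpa using hlt)

-- A's per-element computations: xs[xs.index(x)] is x and ys[xs.index(x)] is the
-- first-match lookup in zip(xs, ys), whenever the first index is inside ys.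
theorem per_element (xs ys : List Int) (x : Int) (hx : x ∈ xs)
    (hb : (PySem.List.index? xs x).getD 0 < ys.length) :
    (xs[(PySem.List.index? xs x).getD 0]?).getD 0 = x ∧
    (ys[(PySem.List.index? xs x).getD 0]?).getD 0 = (List.lookup x (xs.zip ys)).getD 0 := by
  have hsome : (PySem.List.index? xs x).isSome := (PySem.List.index?_isSome_iff xs x).mpr hx
  obtain ⟨i, hi⟩ := Option.isSome_iff_exists.mp hsome
  rw [hi] at hb ⊢
  simp only [Option.getD_some] at hb ⊢
  obtain ⟨hk, hxi, -⟩ := PySem.List.getElem_of_index?_eq_some hi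
  constructor
  · rw [List.getElem?_eq_getElem hk, Option.getD_some, hxi]
  · rw [lookup_zip_index xs ys x i hi hb]

-- Inserting into a key-sorted association list: the first match for k afterwards is the
-- old first match, else the new pair.
theorem lookup_insertBy (p : Int × Int) (ys : List (Int × Int))
    (h : ys.Pairwise (fun a b => a.1 ≤ b.1)) (k : Int) :
    List.lookup k (PySem.List.insertBy (fun a b => decide (a.1 < b.1)) p ys)
      = (List.lookup k ys).or (List.lookup k [p]) := by
  induction ys with
  | nil => simp [PySem.List.insertBy]
  | cons y ys ih =>
    obtain ⟨hy, hys⟩ := List.pairwise_cons.mp h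
    by_cases hlt : p.1 < y.1
    · have hnone : List.lookup p.1 (y :: ys) = none := by
        apply lookup_eq_none_of_forall
        intro q hq
        rcases List.mem_cons.mp hq with rfl | hq
        · omega
        · have := hy q hq; omega
      simp only [PySem.List.insertBy, decide_eq_true hlt, if_true]
      by_cases hk : k = p.1
      · subst hk
        rw [hnone]
        simp [List.lookup]
      · simp [List.lookup, beq_false_of_ne hk]
    · simp only [PySem.List.insertBy, decide_eq_false hlt, Bool.false_eq_true, if_false]
      by_cases hk : k = y.1
      · subst hk
        simp [List.lookup]
      · simp only [List.lookup, beq_false_of_ne hk]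
        exact ih hys

theorem insertBy_pairwise (p : Int × Int) (ys : List (Int × Int))
    (h : ys.Pairwise (fun a b => a.1 ≤ b.1)) :
    (PySem.List.insertBy (fun a b => decide (a.1 < b.1)) p ys).Pairwise (fun a b => a.1 ≤ b.1) := by
  induction ys with
  | nil => simp [PySem.List.insertBy]
  | cons y ys ih =>
    obtain ⟨hy, hys⟩ := List.pairwise_cons.mp h
    by_cases hlt : p.1 < y.1
    · simp only [PySem.List.insertBy, decide_eq_true hlt, if_true]
      refine List.pairwise_cons.mpr ⟨?_, h⟩
      intro q hq
      rcases List.mem_cons.mp hq with rfl | hq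
      · omega
      · have := hy q hq; omega
    · simp only [PySem.List.insertBy, decide_eq_false hlt, Bool.false_eq_true, if_false]
      refine List.pairwise_cons.mpr ⟨?_, ih hys⟩
      intro q hq
      rcases (PySem.List.mem_insertBy _ _ _ _).mp hq with rfl | hq
      · omega
      · exact hy q hq

-- The stable sort by key preserves first-match lookup (stability).
theorem lookup_sorted_fst (l : List (Int × Int)) (k : Int) :
    List.lookup k (PySem.List.sorted l (fun p => p.1) false) = List.lookup k l := by
  rw [PySem.List.sorted_eq_foldl_insertBy]
  have main : ∀ (l : List (Int × Int)) (acc : List (Int × Int)),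
      acc.Pairwise (fun a b => a.1 ≤ b.1) →
      List.lookup k (l.foldl (fun acc x =>
          PySem.List.insertBy (fun a b => decide (a.1 < b.1)) x acc) acc)
        = (List.lookup k acc).or (List.lookup k l) := by
    intro l
    induction l with
    | nil => intro acc _; simp
    | cons p l ih =>
      intro acc hacc
      simp only [List.foldl_cons]
      rw [ih _ (insertBy_pairwise p acc hacc), lookup_insertBy p acc hacc k]
      rcases eq_or_ne k p.1 with hk | hk
      · subst hk
        cases List.lookup p.1 acc <;> simp [List.lookup]
      · cases List.lookup k acc <;> simp [List.lookup, beq_false_of_ne hk]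
  simpa using main l [] (by simp)

-- firstOfRuns: elements come from the input …
theorem mem_firstOfRuns_subset (l : List (Int × Int)) : ∀ p ∈ firstOfRuns l, p ∈ l := by
  induction l using firstOfRuns.induct with
  | case1 => simp [firstOfRuns]
  | case2 p rest ih =>
    intro q hq
    rw [firstOfRuns] at hq
    rcases List.mem_cons.mp hq with rfl | hq
    · exact List.mem_cons_self
    · exact List.mem_cons_of_mem _ ((List.dropWhile_sublist _).subset (ih q hq))

-- … first-match lookup is preserved …
theorem lookup_firstOfRuns (l : List (Int × Int)) (k : Int) :
    List.lookup k (firstOfRuns l) = List.lookup k l := by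
  induction l using firstOfRuns.induct with
  | case1 => simp [firstOfRuns]
  | case2 p rest ih =>
    rw [firstOfRuns]
    by_cases hk : k = p.1
    · subst hk
      simp [List.lookup]
    · simp only [List.lookup, beq_false_of_ne hk]
      rw [ih, lookup_dropWhile_eq rest p.1 k hk]

-- … keys keep the same members …
theorem mem_map_fst_firstOfRuns (l : List (Int × Int)) (x : Int) :
    x ∈ (firstOfRuns l).map Prod.fst ↔ x ∈ l.map Prod.fst := by
  induction l using firstOfRuns.induct with
  | case1 => simp [firstOfRuns]
  | case2 p rest ih =>
    rw [firstOfRuns]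
    simp only [List.map_cons, List.mem_cons, ih]
    constructor
    · rintro (rfl | hx)
      · exact Or.inl rfl
      · refine Or.inr ?_
        rw [← List.takeWhile_append_dropWhile (p := fun q => q.1 == p.1) (l := rest),
          List.map_append, List.mem_append]
        exact Or.inr hx
    · rintro (rfl | hx)
      · exact Or.inl rfl
      · rw [← List.takeWhile_append_dropWhile (p := fun q => q.1 == p.1) (l := rest),
          List.map_append, List.mem_append] at hx
        rcases hx with hx | hx
        · obtain ⟨q, hq, rfl⟩ := List.mem_map.mp hx
          have hqk := List.mem_takeWhile_imp hq
          exact Or.inl (eq_of_beq (by simpa using hqk))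
        · exact Or.inr hx

-- … and on a key-sorted input the keys become strictly increasing.
theorem firstOfRuns_pairwise (l : List (Int × Int))
    (h : l.Pairwise (fun a b => a.1 ≤ b.1)) :
    (firstOfRuns l).Pairwise (fun a b => a.1 < b.1) := by
  induction l using firstOfRuns.induct with
  | case1 => simp [firstOfRuns]
  | case2 p rest ih =>
    rw [firstOfRuns]
    obtain ⟨hp, hrest⟩ := List.pairwise_cons.mp h
    refine List.pairwise_cons.mpr ⟨?_, ih (hrest.sublist (List.dropWhile_sublist _))⟩
    intro q hq
    exact dropWhile_key_gt rest p.1 hrest hp q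
      (mem_firstOfRuns_subset _ q hq)

-- The two-pointer merge of two strictly key-increasing lists: common keys (in u's order)
-- with each side's value by first-match lookup.
theorem mergeCommon_eq (u v : List (Int × Int))
    (hu : u.Pairwise (fun a b => a.1 < b.1)) (hv : v.Pairwise (fun a b => a.1 < b.1)) :
    mergeCommon u v =
      ((u.map Prod.fst).filter (fun x => (v.map Prod.fst).contains x),
       (u.map Prod.fst).filter (fun x => (v.map Prod.fst).contains x),
       ((u.map Prod.fst).filter (fun x => (v.map Prod.fst).contains x)).map
         (fun x => (List.lookup x u).getD 0),
       ((u.map Prod.fst).filter (fun x => (v.map Prod.fst).contains x)).map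
         (fun x => (List.lookup x v).getD 0)) := by
  revert hu hv
  induction u, v using mergeCommon.induct with
  | case1 v => intro _ _; simp [mergeCommon]
  | case2 p u => intro _ _; simp [mergeCommon]
  | case3 x1 y1 u x2 y2 v hlt ih =>
    intro hu hv
    obtain ⟨hu1, hu'⟩ := List.pairwise_cons.mp hu
    obtain ⟨hv1, hv'⟩ := List.pairwise_cons.mp hv
    have hnotm : x1 ∉ x2 :: v.map Prod.fst := by
      simp only [List.mem_cons]
      rintro (h | h)
      · omega
      · obtain ⟨q, hq, rfl⟩ := List.mem_map.mp h
        have := hv1 q hq; omega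
    simp only [mergeCommon, if_pos hlt]
    rw [ih hu' hv]
    simp only [List.map_cons]
    rw [List.filter_cons_of_neg (by simpa using hnotm)]
    refine Prod.ext rfl (Prod.ext rfl (Prod.ext ?_ rfl))
    refine List.map_congr_left ?_
    intro x hx
    obtain ⟨hxu, -⟩ := List.mem_filter.mp hx
    obtain ⟨q, hq, rfl⟩ := List.mem_map.mp hxu
    have hne : q.1 ≠ x1 := by have := hu1 q hq; omega
    simp [List.lookup, beq_false_of_ne hne]
  | case4 x1 y1 u x2 y2 v h1 h2 ih =>
    intro hu hv
    obtain ⟨hv1, hv'⟩ := List.pairwise_cons.mp hv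
    obtain ⟨hu1, hu'⟩ := List.pairwise_cons.mp hu
    have hkey : ∀ x ∈ x1 :: u.map Prod.fst, x ≠ x2 := by
      intro x hx
      rcases List.mem_cons.mp hx with rfl | hx
      · omega
      · obtain ⟨q, hq, rfl⟩ := List.mem_map.mp hx
        have := hu1 q hq; omega
    simp only [mergeCommon, if_neg h1, if_pos h2]
    rw [ih hu hv']
    simp only [List.map_cons]
    have hFc : (x1 :: u.map Prod.fst).filter
          (fun x => (x2 :: v.map Prod.fst).contains x)
        = (x1 :: u.map Prod.fst).filter (fun x => (v.map Prod.fst).contains x) := by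
      refine List.filter_congr ?_
      intro x hx
      simp [List.mem_cons, hkey x hx]
    rw [hFc]
    refine Prod.ext rfl (Prod.ext rfl (Prod.ext rfl ?_))
    refine List.map_congr_left ?_
    intro x hx
    obtain ⟨hxu, -⟩ := List.mem_filter.mp hx
    have hne : x ≠ x2 := hkey x hxu
    simp [List.lookup, beq_false_of_ne hne]
  | case5 x1 y1 u x2 y2 v h1 h2 ih =>
    intro hu hv
    have hx : x2 = x1 := by omega
    subst hx
    obtain ⟨hu1, hu'⟩ := List.pairwise_cons.mp hu
    obtain ⟨hv1, hv'⟩ := List.pairwise_cons.mp hv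
    have hkey : ∀ x ∈ u.map Prod.fst, x2 < x := by
      intro x hx
      obtain ⟨q, hq, rfl⟩ := List.mem_map.mp hx
      exact hu1 q hq
    simp only [mergeCommon, if_neg h1]
    rw [ih hu' hv']
    simp only [List.map_cons]
    have hF : (x2 :: u.map Prod.fst).filter
          (fun x => (x2 :: v.map Prod.fst).contains x)
        = x2 :: (u.map Prod.fst).filter (fun x => (v.map Prod.fst).contains x) := by
      rw [List.filter_cons_of_pos (by simp)]
      congr 1
      refine List.filter_congr ?_
      intro x hx
      have hne : x ≠ x2 := by have := hkey x hx; omega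
      simp [List.mem_cons, hne]
    rw [hF]
    refine Prod.ext rfl (Prod.ext rfl (Prod.ext ?_ ?_))
    · simp only [List.map_cons]
      have hhead : (List.lookup x2 ((x2, y1) :: u)).getD 0 = y1 := by simp [List.lookup]
      rw [hhead]
      congr 1
      refine List.map_congr_left ?_
      intro x hx
      obtain ⟨hxu, -⟩ := List.mem_filter.mp hx
      have hne : x ≠ x2 := by have := hkey x hxu; omega
      simp [List.lookup, beq_false_of_ne hne]
    · simp only [List.map_cons]
      have hhead : (List.lookup x2 ((x2, y2) :: v)).getD 0 = y2 := by simp [List.lookup]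
      rw [hhead]
      congr 1
      refine List.map_congr_left ?_
      intro x hx
      obtain ⟨hxu, -⟩ := List.mem_filter.mp hx
      have hne : x ≠ x2 := by have := hkey x hxu; omega
      simp [List.lookup, beq_false_of_ne hne]

-- membership in the key column of a key-sorted pair list is membership before sorting
theorem mem_map_fst_sorted (l : List (Int × Int)) (x : Int) :
    x ∈ (PySem.List.sorted l (fun p => p.1) false).map Prod.fst ↔ x ∈ l.map Prod.fst := by
  simp [List.mem_map, PySem.List.mem_sorted]

-- ===== VERDICT (by name: the statement is the Claim_ definition above) =====
theorem get_intersections_spec : Claim_equal_get_intersections := by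
  intro scan1 scan2 _ hpre
  obtain ⟨h1, h2, -, -, hbound⟩ := hpre
  match scan1, h1 with
  | s1x :: s1y :: t1, _ =>
  match scan2, h2 with
  | s2x0 :: s2y0 :: t2, _ =>
  simp only [List.getD, List.getElem?_cons_zero, List.getElem?_cons_succ,
    Option.getD_some] at hbound ⊢
  show Spec_get_intersections _ _ _
  unfold Spec_get_intersections get_intersections get_intersections_alt
  simp only [List.getD, List.getElem?_cons_zero, List.getElem?_cons_succ, Option.getD_some]
  set s2x' := s2x0.dropLast with hs2x'
  set s2y' := s2y0.dropLast with hs2y'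
  set u := firstOfRuns (PySem.List.sorted (s1x.zip s1y) (fun p => p.1) false) with hudef
  set v := firstOfRuns (PySem.List.sorted (s2x'.zip s2y') (fun p => p.1) false) with hvdef
  have hu : u.Pairwise (fun a b => a.1 < b.1) :=
    firstOfRuns_pairwise _ (PySem.List.sorted_pairwise _ _)
  have hv : v.Pairwise (fun a b => a.1 < b.1) :=
    firstOfRuns_pairwise _ (PySem.List.sorted_pairwise _ _)
  rw [mergeCommon_eq u v hu hv]
  set C := (u.map Prod.fst).filter (fun x => (v.map Prod.fst).contains x) with hCdef
  -- membership in each side's key column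
  have hukeys : ∀ x : Int, x ∈ u.map Prod.fst ↔ x ∈ (s1x.zip s1y).map Prod.fst := by
    intro x
    rw [hudef, mem_map_fst_firstOfRuns, mem_map_fst_sorted]
  have hvkeys : ∀ x : Int, x ∈ v.map Prod.fst ↔ x ∈ (s2x'.zip s2y').map Prod.fst := by
    intro x
    rw [hvdef, mem_map_fst_firstOfRuns, mem_map_fst_sorted]
  have hzip_of : ∀ (xs ys : List Int) (x : Int),
      x ∈ (xs.zip ys).map Prod.fst → x ∈ xs := by
    intro xs ys x hx
    obtain ⟨p, hp, rfl⟩ := List.mem_map.mp hx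
    obtain ⟨q1, q2⟩ := p
    exact (List.of_mem_zip hp).1
  have hzip_in : ∀ (xs ys : List Int) (x : Int) (i : Nat),
      PySem.List.index? xs x = some i → i < ys.length →
      x ∈ (xs.zip ys).map Prod.fst := by
    intro xs ys x i hidx hlt
    obtain ⟨hk, hxi, -⟩ := PySem.List.getElem_of_index?_eq_some hidx
    have hzl : i < (xs.zip ys).length := by
      rw [List.length_zip]; omega
    refine List.mem_map.mpr ⟨(xs.zip ys)[i], List.getElem_mem hzl, ?_⟩
    rw [List.getElem_zip]
    simpa using hxi
  -- C is exactly the common x-values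
  have hCmem : ∀ x : Int, x ∈ C ↔ x ∈ s1x ∧ x ∈ s2x' := by
    intro x
    rw [hCdef, List.mem_filter]
    constructor
    · rintro ⟨hxu, hxv⟩
      refine ⟨hzip_of _ _ _ ((hukeys x).mp hxu), hzip_of _ _ _ ((hvkeys x).mp ?_)⟩
      simpa using hxv
    · rintro ⟨hx1, hx2⟩
      obtain ⟨hb1, hb2⟩ := hbound x hx1 hx2
      have hi1 : (PySem.List.index? s1x x).isSome :=
        (PySem.List.index?_isSome_iff s1x x).mpr hx1
      obtain ⟨i1, hidx1⟩ := Option.isSome_iff_exists.mp hi1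
      have hi2 : (PySem.List.index? s2x' x).isSome :=
        (PySem.List.index?_isSome_iff s2x' x).mpr hx2
      obtain ⟨i2, hidx2⟩ := Option.isSome_iff_exists.mp hi2
      rw [hidx1] at hb1
      rw [hidx2] at hb2
      simp only [Option.getD_some] at hb1 hb2
      refine ⟨(hukeys x).mpr (hzip_in _ _ _ i1 hidx1 hb1), ?_⟩
      simpa using (hvkeys x).mpr (hzip_in _ _ _ i2 hidx2 hb2)
  have hCpair : C.Pairwise (fun a b => a < b) :=
    (List.pairwise_map.mpr hu).filter _
  have hCnodup : C.Nodup := hCpair.imp (fun h => ne_of_lt h)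
  have hinter_nodup : (PySem.Set.inter (PySem.Set.ofList s1x) s2x').Nodup := by
    unfold PySem.Set.inter
    exact (PySem.Set.nodup_ofList s1x).filter _
  have hperm : C.Perm (PySem.Set.inter (PySem.Set.ofList s1x) s2x') := by
    rw [List.perm_ext_iff_of_nodup hCnodup hinter_nodup]
    intro a
    rw [hCmem a, PySem.Set.mem_inter, PySem.Set.mem_ofList]
  have hC : PySem.List.sorted (PySem.Set.inter (PySem.Set.ofList s1x) s2x') (fun x => x) false
      = C := PySem.List.sorted_eq_of_perm_of_pairwise_lt _ _ _ hperm hCpair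
  rw [hC]
  -- per-element values: B's merged y is the y at x's first index
  have hlooku : ∀ x : Int, List.lookup x u = List.lookup x (s1x.zip s1y) := by
    intro x
    rw [hudef, lookup_firstOfRuns, lookup_sorted_fst]
  have hlookv : ∀ x : Int, List.lookup x v = List.lookup x (s2x'.zip s2y') := by
    intro x
    rw [hvdef, lookup_firstOfRuns, lookup_sorted_fst]
  refine Prod.ext ?_ (Prod.ext ?_ (Prod.ext ?_ ?_)) <;> simp only <;> rw [List.map_map]
  · -- indexed_a_x = C
    refine ((List.map_congr_left ?_).trans (List.map_id C))
    intro x hx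
    obtain ⟨hx1, hx2⟩ := (hCmem x).mp hx
    have hb := (hbound x hx1 hx2).1
    simpa [List.getD_eq_getElem?_getD] using (per_element s1x s1y x hx1 hb).1
  · -- indexed_b_x = C
    refine ((List.map_congr_left ?_).trans (List.map_id C))
    intro x hx
    obtain ⟨hx1, hx2⟩ := (hCmem x).mp hx
    have hb := (hbound x hx1 hx2).2
    simpa [List.getD_eq_getElem?_getD] using (per_element s2x' s2y' x hx2 hb).1
  · -- indexed_a_y
    refine List.map_congr_left ?_
    intro x hx
    obtain ⟨hx1, hx2⟩ := (hCmem x).mp hx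
    have hb := (hbound x hx1 hx2).1
    rw [hlooku x]
    simpa [List.getD_eq_getElem?_getD] using (per_element s1x s1y x hx1 hb).2
  · -- indexed_b_y
    refine List.map_congr_left ?_
    intro x hx
    obtain ⟨hx1, hx2⟩ := (hCmem x).mp hx
    have hb := (hbound x hx1 hx2).2
    rw [hlookv x]
    simpa [List.getD_eq_getElem?_getD] using (per_element s2x' s2y' x hx2 hb).2
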